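-- pv_equiv track=rewrite | github.com/chvjak/hr-practice | grid-challenge.py | cols_sorted
-- ===== SOURCE A (Python) =====
-- def cols_sorted(A):
--     N = len(A)
--     for k in range(N):
--         for j in range(N - 1):
--             if A[j][k] > A[j + 1][k]:
--                 return False
--     else:
--         return True
-- ===== SOURCE B (Python) =====
-- def cols_sorted(A):
--     n = len(A)
--     cols = list(zip(*A))[:n]
--     return all(list(col) == sorted(col) for col in cols)
-- ===== Notes on version B (the rewrite author's own statement) =====
-- stated objective: simpler
-- what changed: Replaces A's explicit column-major double index loop with early return by transposing the grid (zip of the rows, truncated to the first N columns) and checking that each column equals its sorted copy.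
-- outside the precondition, e.g. on cols_sorted([['a', 'b'], ['a', 'a'], ['a']]): A returns False, B returns True
import Mathlib
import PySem

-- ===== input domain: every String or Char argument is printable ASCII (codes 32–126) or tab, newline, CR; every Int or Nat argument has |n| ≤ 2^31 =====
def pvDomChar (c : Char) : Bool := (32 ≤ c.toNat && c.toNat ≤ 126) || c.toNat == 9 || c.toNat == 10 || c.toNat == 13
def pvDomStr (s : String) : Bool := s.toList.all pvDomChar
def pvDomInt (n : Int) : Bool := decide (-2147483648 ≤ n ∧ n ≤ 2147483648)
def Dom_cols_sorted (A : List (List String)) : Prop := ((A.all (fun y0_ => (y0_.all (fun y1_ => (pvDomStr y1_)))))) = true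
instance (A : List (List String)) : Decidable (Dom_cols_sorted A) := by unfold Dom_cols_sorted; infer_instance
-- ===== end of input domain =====

-- B replaces A's explicit column-major double index loop by transposing the grid
-- (zip of the rows, truncated to the first N columns) and checking that each column
-- equals its sorted copy (objective: simpler).

-- ===== PORT A =====
-- for k in range(N): for j in range(N-1): if A[j][k] > A[j+1][k]: return False; return True
def cols_sorted (A : List (List String)) : Bool :=
  let N := A.length
  (List.range N).all (fun k =>
    (List.range (N - 1)).all (fun j =>
      !(decide (PySem.List.pyGetD (PySem.List.pyGetD A ((j : Int)) []) ((k : Int)) "" >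
                PySem.List.pyGetD (PySem.List.pyGetD A ((j : Int) + 1) []) ((k : Int)) ""))))

-- ===== PORT B =====
-- zip(*rows) hand-ported: column i is the i-th element of each row, for i below the
-- shortest row length (exact for list-of-list input; the `getD` default is never
-- reached since i stays below every row's length)
def pyZipStar (rows : List (List String)) : List (List String) :=
  (List.range (((rows.map List.length).min?).getD 0)).map
    (fun i => rows.map (fun r => r.getD i ""))

def cols_sorted_alt (A : List (List String)) : Bool :=
  let n := A.length
  let cols := PySem.List.slice (pyZipStar A) none (some ((n : Int)))
  cols.all (fun col => col == PySem.List.sorted col (fun x => x) false)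

-- ===== PRECONDITION & SPEC =====
-- Pre_ excludes ragged grids of ≥ 2 rows (some row shorter than len(A)) UNLESS some
-- fully-present column is already out of order: on the excluded grids A raises
-- IndexError, except when the raggedness is only reached after an out-of-order entry
-- in a partially-present column, where A happens to return False first.
def Pre_cols_sorted (A : List (List String)) : Prop :=
  A.length ≤ 1 ∨ (∀ r ∈ A, A.length ≤ r.length) ∨
    (∃ k < A.length, (∀ r ∈ A, k < r.length) ∧
      ∃ j < A.length - 1, (A.getD (j+1) []).getD k "" < (A.getD j []).getD k "")
instance (A : List (List String)) : Decidable (Pre_cols_sorted A) := by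
  unfold Pre_cols_sorted; infer_instance

def pvWitness_cols_sorted : List (List String) := [["a", "b"], ["a", "c"]]

def Spec_cols_sorted (A : List (List String)) (out : Bool) : Prop := out = cols_sorted_alt A
instance (A : List (List String)) (out : Bool) : Decidable (Spec_cols_sorted A out) := by
  unfold Spec_cols_sorted; infer_instance

-- ===== CLAIM (what is proved, stated in full; the proofs are below) =====
def Claim_equal_cols_sorted : Prop :=
  ∀ (A : List (List String)), Dom_cols_sorted A → Pre_cols_sorted A →
    Spec_cols_sorted A (cols_sorted A)

-- ===== LEMMAS AND PROOFS =====

-- entry (j, k) of the grid, as both ports access it on in-range indices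
def ent (A : List (List String)) (j k : Nat) : String := (A.getD j []).getD k ""

theorem entry_eq (A : List (List String)) (j k : Nat) :
    PySem.List.pyGetD (PySem.List.pyGetD A ((j : Int)) []) ((k : Int)) "" = ent A j k := by
  simp [PySem.List.pyGetD_natCast, ent, List.getD]

theorem entry_eq' (A : List (List String)) (j k : Nat) :
    PySem.List.pyGetD (PySem.List.pyGetD A ((j : Int) + 1) []) ((k : Int)) "" = ent A (j+1) k := by
  rw [show ((j : Int) + 1) = (((j + 1 : Nat)) : Int) by push_cast; ring]
  exact entry_eq A (j+1) k

-- port A returns true iff every column k < N is adjacent-wise non-decreasing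
theorem cols_sorted_iff (A : List (List String)) :
    cols_sorted A = true ↔
      ∀ k < A.length, ∀ j, j + 1 < A.length → ent A j k ≤ ent A (j+1) k := by
  simp only [cols_sorted, List.all_eq_true, List.mem_range, Bool.not_eq_eq_eq_not,
    Bool.not_true, decide_eq_false_iff_not, not_lt, entry_eq, entry_eq']
  constructor
  · intro h k hk j hj; exact h k hk j (by omega)
  · intro h k hk j hj; exact h k hk j (by omega)

-- list(col) == sorted(col) iff col is non-decreasing
theorem eq_sorted_iff (l : List String) :
    (l == PySem.List.sorted l (fun x => x) false) = true ↔ l.Pairwise (· ≤ ·) := by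
  rw [beq_iff_eq]
  constructor
  · intro h
    have hp := PySem.List.sorted_pairwise (xs := l) (key := fun x => x)
    rw [← h] at hp
    exact hp
  · intro h
    exact (PySem.List.sorted_eq_self_of_pairwise l (fun x => x) h).symm

-- the column list of port B: the first min(N, shortest-row-length) columns
theorem cols_alt_eq (A : List (List String)) :
    PySem.List.slice (pyZipStar A) none (some ((A.length : Int))) =
      (List.range (min A.length (((A.map List.length).min?).getD 0))).map
        (fun i => A.map (fun r => r.getD i "")) := by
  rw [PySem.List.slice_to_natCast, pyZipStar, ← List.map_take, List.take_range]

-- a column entry is the corresponding grid entry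
theorem col_getElem (A : List (List String)) (k j : Nat) (hj : j < A.length) :
    (A.map (fun r => r.getD k ""))[j]'(by simpa using hj) = ent A j k := by
  simp [ent, List.getD_eq_getElem?_getD, List.getElem?_eq_getElem hj]

-- the shortest-row length: below it every column is fully present
theorem min_len_spec (A : List (List String)) (hne : A ≠ []) :
    ∃ v, (A.map List.length).min? = some v ∧ (∃ r ∈ A, r.length = v) ∧
      ∀ r ∈ A, v ≤ r.length := by
  obtain ⟨v, hv⟩ : ∃ v, (A.map List.length).min? = some v := by
    cases h : (A.map List.length).min? with
    | none => rw [List.min?_eq_none_iff] at h; simp [hne] at h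
    | some v => exact ⟨v, rfl⟩
  have hv' := hv
  rw [List.min?_eq_some_iff] at hv'
  rcases hv' with ⟨hmem, hle⟩
  simp only [List.mem_map] at hmem
  rcases hmem with ⟨r, hr, hrv⟩
  exact ⟨v, hv, ⟨r, hr, hrv⟩, fun s hs => hle _ (List.mem_map_of_mem hs)⟩

-- port B returns true iff the same condition, when no row is shorter than N
theorem cols_sorted_alt_iff (A : List (List String)) (hne : A ≠ [])
    (hpre : ∀ r ∈ A, A.length ≤ r.length) :
    cols_sorted_alt A = true ↔
      ∀ k < A.length, ∀ j, j + 1 < A.length → ent A j k ≤ ent A (j+1) k := by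
  rcases min_len_spec A hne with ⟨v, hv, ⟨r, hr, hrv⟩, hvle⟩
  have hnv : min A.length (((A.map List.length).min?).getD 0) = A.length := by
    rw [hv]; simpa using hrv ▸ hpre r hr
  simp only [cols_sorted_alt, cols_alt_eq, hnv, List.all_eq_true, List.mem_map,
    List.mem_range]
  constructor
  · intro h k hk j hj
    have hc := h _ ⟨k, hk, rfl⟩
    rw [eq_sorted_iff, List.pairwise_iff_getElem] at hc
    have := hc j (j+1) (by simp; omega) (by simp; omega) (by omega)
    rw [col_getElem A k j (by omega), col_getElem A k (j+1) (by omega)] at this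
    exact this
  · intro h
    rintro col ⟨k, hk, rfl⟩
    rw [eq_sorted_iff, ← List.isChain_iff_pairwise, List.isChain_iff_getElem]
    intro i hi
    simp only [List.length_map] at hi
    rw [col_getElem A k i (by omega), col_getElem A k (i+1) (by omega)]
    exact h k hk i (by omega)

-- a grid of at most one row compares nothing: port A returns true
theorem cols_sorted_short (A : List (List String)) (h : A.length ≤ 1) :
    cols_sorted A = true := by
  rw [cols_sorted_iff A]
  intro k hk j hj
  omega

-- and every column of port B has at most one entry, hence equals its sorted copy
theorem cols_sorted_alt_short (A : List (List String)) (h : A.length ≤ 1) :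
    cols_sorted_alt A = true := by
  simp only [cols_sorted_alt, cols_alt_eq, List.all_eq_true, List.mem_map, List.mem_range]
  rintro col ⟨k, hk, rfl⟩
  rw [eq_sorted_iff]
  have hshort : ∀ (l : List String), l.length ≤ 1 → l.Pairwise (fun a b => a ≤ b) := by
    intro l hl
    match l with
    | [] => exact List.Pairwise.nil
    | [x] => exact List.pairwise_singleton _ x
    | x :: y :: t => simp at hl
  exact hshort _ (by simpa using h)

-- on a ragged grid with an out-of-order fully-present column, both ports return false
theorem both_false (A : List (List String)) (k j : Nat) (hkn : k < A.length)
    (hkall : ∀ r ∈ A, k < r.length) (hj : j + 1 < A.length)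
    (hlt : ent A (j+1) k < ent A j k) :
    cols_sorted A = false ∧ cols_sorted_alt A = false := by
  have hne : A ≠ [] := by intro h; rw [h] at hj; simp at hj
  constructor
  · cases hA : cols_sorted A with
    | false => rfl
    | true =>
      exfalso
      have := (cols_sorted_iff A).mp hA k hkn j hj
      exact absurd hlt (not_lt.mpr this)
  · cases hB : cols_sorted_alt A with
    | false => rfl
    | true =>
      exfalso
      rcases min_len_spec A hne with ⟨v, hv, ⟨r, hr, hrv⟩, hvle⟩
      have hkv : k < v := by have := hkall r hr; omega
      simp only [cols_sorted_alt, cols_alt_eq, hv, List.all_eq_true, List.mem_map,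
        List.mem_range] at hB
      have hc := hB _ ⟨k, by simp; omega, rfl⟩
      rw [eq_sorted_iff, List.pairwise_iff_getElem] at hc
      have := hc j (j+1) (by simp; omega) (by simp; omega) (by omega)
      rw [col_getElem A k j (by omega), col_getElem A k (j+1) (by omega)] at this
      exact absurd hlt (not_lt.mpr this)

-- ===== VERDICT (by name: the statement is the Claim_ definition above) =====
theorem cols_sorted_spec : Claim_equal_cols_sorted := by
  unfold Claim_equal_cols_sorted
  intro A _ hpre
  unfold Spec_cols_sorted
  unfold Pre_cols_sorted at hpre
  rcases hpre with hle | hpre | ⟨k, hkn, hkall, j, hj, hlt⟩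
  · rw [cols_sorted_short A hle, cols_sorted_alt_short A hle]
  · rcases eq_or_ne A [] with rfl | hne
    · rfl
    · rw [Bool.eq_iff_iff, cols_sorted_iff A, cols_sorted_alt_iff A hne hpre]
  · rcases both_false A k j hkn hkall (by omega) hlt with ⟨h1, h2⟩
    rw [h1, h2]
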